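-- pv_equiv track=rewrite | github.com/g0729/Algorithm | 프로그래머스/0/181880. 1로 만들기/1로 만들기.py | solution
-- ===== SOURCE A (Python) =====
-- def solution(num_list):
--     answer=0
--
--     for num in num_list:
--         cnt =0
--         while(num!=1):
--             num = (num-1)//2 if num%2 else num//2
--             cnt+=1
--         answer+=cnt
--     return answer
-- ===== SOURCE B (Python) =====
-- def solution(num_list):
--     answer = 0
--     for num in num_list:
--         p, cnt = 1, 0
--         while p * 2 <= num:
--             p *= 2
--             cnt += 1
--         answer += cnt
--     return answer
-- ===== Notes on version B (the rewrite author's own statement) =====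
-- stated objective: alternative
-- what changed: Per number, instead of mutating num downward by repeated floor-halving until it reaches 1, B keeps a growing power of two p and counts how many times it can double while staying <= num; pure integer arithmetic, same count.
import Mathlib
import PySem

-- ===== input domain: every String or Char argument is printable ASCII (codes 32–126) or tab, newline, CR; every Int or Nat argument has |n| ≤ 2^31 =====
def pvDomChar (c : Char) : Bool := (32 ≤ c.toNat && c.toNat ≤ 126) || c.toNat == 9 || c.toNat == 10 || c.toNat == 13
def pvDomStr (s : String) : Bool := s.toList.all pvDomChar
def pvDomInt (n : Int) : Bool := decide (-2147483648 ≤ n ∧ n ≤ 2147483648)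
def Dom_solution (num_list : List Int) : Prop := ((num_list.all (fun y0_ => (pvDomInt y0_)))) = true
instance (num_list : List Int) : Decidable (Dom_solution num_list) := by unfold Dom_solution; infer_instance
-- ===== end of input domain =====

-- B replaces A's downward floor-halving of each num with an upward doubling power-of-two count; alternative decomposition, same results on positive entries.


-- ===== PORT A =====
-- A's inner while loop: num = (num-1)//2 if num%2 else num//2 until num == 1, counting steps.
-- The guard 'num ≤ 1 → 0' only totalizes the recursion: for num ≤ 0 Python diverges (excluded by Pre_).
def loopA (num : Int) : Int :=
  if h : num ≤ 1 then 0
  else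
    (if PySem.Int.mod num 2 ≠ 0 then loopA (PySem.Int.floordiv (num - 1) 2)
     else loopA (PySem.Int.floordiv num 2)) + 1
termination_by num.toNat
decreasing_by
  · have := PySem.Int.floordiv_lt_iff_lt_mul (a := num - 1) (b := 2) (q := num) (by omega)
    have := PySem.Int.le_floordiv_iff_mul_le (q := 0) (a := num - 1) (b := 2) (by omega)
    omega
  · have := PySem.Int.floordiv_lt_iff_lt_mul (a := num) (b := 2) (q := num) (by omega)
    have := PySem.Int.le_floordiv_iff_mul_le (q := 0) (a := num) (b := 2) (by omega)
    omega

def solution (num_list : List Int) : Int :=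
  num_list.foldl (fun answer num => answer + loopA num) 0

-- ===== PORT B =====
-- B's inner while loop: double p starting from 1 while p*2 ≤ num, counting doublings.
-- fuel = num.toNat + 1 bounds the iteration count (each doubling needs p*2 ≤ num, so at most num steps).
def loopB (fuel : Nat) (num p cnt : Int) : Int :=
  match fuel with
  | 0 => cnt
  | f + 1 => if p * 2 ≤ num then loopB f num (p * 2) (cnt + 1) else cnt

def solution_alt (num_list : List Int) : Int :=
  num_list.foldl (fun answer num => answer + loopB (num.toNat + 1) num 1 0) 0

-- ===== PRECONDITION & SPEC =====
-- Pre_ excludes lists with an entry ≤ 0: A's while loop never terminates there (Python diverges).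
def Pre_solution (num_list : List Int) : Prop := ∀ n ∈ num_list, 1 ≤ n
instance (num_list : List Int) : Decidable (Pre_solution num_list) := by unfold Pre_solution; infer_instance
def pvWitness_solution : List Int := [1, 2, 7, 1024]
def Spec_solution (num_list : List Int) (out : Int) : Prop := out = solution_alt num_list
instance (num_list : List Int) (out : Int) : Decidable (Spec_solution num_list out) := by unfold Spec_solution; infer_instance

-- ===== CLAIM (what is proved, stated in full; the proofs are below) =====
def Claim_equal_solution : Prop := ∀ (num_list : List Int), Dom_solution num_list → Pre_solution num_list → Spec_solution num_list (solution num_list)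

-- ===== LEMMAS AND PROOFS =====

-- Both of A's parity branches are floor-halving: loopA n = loopA (n/2) + 1 for n ≥ 2 (over Nat).
lemma loopA_step (m : Nat) (h : 2 ≤ m) : loopA (m : Int) = loopA ((m / 2 : Nat) : Int) + 1 := by
  rw [loopA]
  have h1 : ¬ ((m : Int) ≤ 1) := by exact_mod_cast (by omega : ¬ (m ≤ 1))
  simp only [dif_neg h1]
  by_cases hp : PySem.Int.mod (m : Int) 2 ≠ 0
  · simp only [if_pos hp]
    rw [PySem.Int.floordiv_eq_ediv_of_pos (by omega)]
    have hm2 : (m : Int) % 2 ≠ 0 := by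
      rwa [PySem.Int.mod_eq_emod_of_pos (by omega)] at hp
    congr 2
    omega
  · simp only [if_neg hp]
    rw [PySem.Int.floordiv_eq_ediv_of_pos (by omega)]
    congr 2

lemma loopA_one : loopA 1 = 0 := by rw [loopA]; simp

-- loopB counts doublings of p that stay ≤ num: result = cnt + loopA (num / p), for 1 ≤ p ≤ num.
lemma loopB_char (fuel : Nat) : ∀ (n q : Nat) (cnt : Int), 1 ≤ q → q ≤ n → n < q * 2 ^ fuel →
    loopB fuel (n : Int) (q : Int) cnt = cnt + loopA ((n / q : Nat) : Int) := by
  induction fuel with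
  | zero => intro n q cnt h1 h2 h3; simp at h3; omega
  | succ f ih =>
    intro n q cnt h1 h2 h3
    rw [loopB]
    by_cases hle : (q : Int) * 2 ≤ (n : Int)
    · have hq2 : q * 2 ≤ n := by exact_mod_cast hle
      rw [if_pos hle]
      have hcast : (q : Int) * 2 = ((q * 2 : Nat) : Int) := by push_cast; ring
      rw [hcast, ih n (q * 2) (cnt + 1) (by omega) hq2 (by
        have : q * 2 * 2 ^ f = q * 2 ^ (f + 1) := by ring
        omega)]
      have hdiv2 : 2 ≤ n / q := (Nat.le_div_iff_mul_le (by omega)).mpr (by omega)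
      rw [loopA_step (n / q) hdiv2, Nat.div_div_eq_div_mul, Nat.mul_comm q 2]
      ring
    · rw [if_neg hle]
      have hlt : n < q * 2 := by
        have : ¬ ((q * 2 : Nat) : Int) ≤ ((n : Nat) : Int) := by push_cast; push_cast at hle; omega
        exact_mod_cast not_le.mp (by push_cast at this ⊢; omega)
      have hdiv1 : n / q = 1 := by
        have l1 : 1 ≤ n / q := (Nat.one_le_div_iff (by omega)).mpr h2
        have l2 : n / q < 2 := Nat.div_lt_iff_lt_mul (by omega) |>.mpr (by
          have : ¬ (q * 2 ≤ n) := by exact_mod_cast hle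
          omega)
        omega
      rw [hdiv1]
      simp [loopA_one]

lemma inner_eq (num : Int) (h : 1 ≤ num) : loopA num = loopB (num.toNat + 1) num 1 0 := by
  obtain ⟨n, rfl⟩ : ∃ n : Nat, num = (n : Int) := ⟨num.toNat, by omega⟩
  have hn : 1 ≤ n := by exact_mod_cast h
  rw [Int.toNat_natCast]
  have hb : n < 1 * 2 ^ (n + 1) :=
    calc n < 2 ^ n := Nat.lt_two_pow_self
      _ ≤ 2 ^ (n + 1) := Nat.pow_le_pow_right (by omega) (by omega)
      _ = 1 * 2 ^ (n + 1) := (one_mul _).symm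
  have hc := loopB_char (n + 1) n 1 0 (by omega) hn hb
  rw [Nat.cast_one] at hc
  rw [hc, Nat.div_one]
  simp

-- ===== VERDICT (by name: the statement is the Claim_ definition above) =====
theorem solution_spec : Claim_equal_solution := by
  intro num_list _ hpre
  unfold Spec_solution solution solution_alt
  have key : ∀ (a : Int) (l : List Int), (∀ n ∈ l, 1 ≤ n) →
      l.foldl (fun answer num => answer + loopA num) a
      = l.foldl (fun answer num => answer + loopB (num.toNat + 1) num 1 0) a := by
    intro a l hl
    induction l generalizing a with
    | nil => rfl
    | cons y ys ihy =>
      simp only [List.foldl_cons]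
      rw [inner_eq y (hl y (by simp))]
      exact ihy _ (fun n hn => hl n (by simp [hn]))
  exact key 0 num_list hpre
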